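-- pv_equiv track=rewrite | github.com/shfrancini/Timao | test_docx_to_excel.py | filter_leaf_paths
-- ===== SOURCE A (Python) =====
-- def filter_leaf_paths(rows):
--     leaf_rows = []
--     for i, row in enumerate(rows):
--         row_trimmed = [x for x in row if x]
--
--         is_leaf = True
--         for j, other in enumerate(rows):
--             if i == j:
--                 continue
--             other_trimmed = [x for x in other if x]
--             if len(other_trimmed) > len(row_trimmed) and other_trimmed[:len(row_trimmed)] == row_trimmed:
--                 is_leaf = False
--                 break
--         if is_leaf:
--             leaf_rows.append(row)
--     return leaf_rows
-- ===== SOURCE B (Python) =====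
-- def filter_leaf_paths(rows):
--     trimmed = [tuple(x for x in row if x) for row in rows]
--     prefixes = set()
--     for t in trimmed:
--         for k in range(len(t)):
--             prefixes.add(t[:k])
--     return [row for row, t in zip(rows, trimmed) if t not in prefixes]
-- ===== Notes on version B (the rewrite author's own statement) =====
-- stated objective: faster
-- what changed: Instead of comparing every row against every other row, B builds the set of all proper prefixes of the trimmed rows once and keeps a row iff its trimmed form is not in that set.
import Mathlib
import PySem

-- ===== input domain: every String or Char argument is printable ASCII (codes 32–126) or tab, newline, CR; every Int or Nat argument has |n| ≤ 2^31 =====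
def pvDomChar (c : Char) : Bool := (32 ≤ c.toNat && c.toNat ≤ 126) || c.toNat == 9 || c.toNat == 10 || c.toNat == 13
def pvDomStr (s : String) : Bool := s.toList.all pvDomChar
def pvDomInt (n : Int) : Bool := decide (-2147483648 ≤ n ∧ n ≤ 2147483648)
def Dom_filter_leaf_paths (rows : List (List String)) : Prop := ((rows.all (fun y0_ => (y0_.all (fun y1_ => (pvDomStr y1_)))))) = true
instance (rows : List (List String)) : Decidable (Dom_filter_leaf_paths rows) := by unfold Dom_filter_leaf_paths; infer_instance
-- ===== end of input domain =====

-- B replaces A's quadratic all-pairs prefix comparison by a set of all proper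
-- prefixes of the trimmed rows built once; objective: faster (asymptotic).


-- ===== PORT A =====
-- [x for x in row if x]  (Python truthiness of a string = non-empty)
def pyTrim (row : List String) : List String := row.filter (fun x => x ≠ "")

-- the condition of A's inner 'if' (other already trimmed)
def aCond (ot rt : List String) : Bool :=
  decide (ot.length > rt.length) && decide (ot.take rt.length = rt)

-- A's inner loop: 'for j, other in enumerate(rows): …' with 'continue' at i = j and 'break' on a hit
def aIsLeaf (rt : List String) (i : Nat) : List (List String) → Nat → Bool
  | [], _ => true
  | other :: rest, j =>
      if i = j then aIsLeaf rt i rest (j + 1)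
      else
        let ot := pyTrim other
        if aCond ot rt then false else aIsLeaf rt i rest (j + 1)

-- A's outer loop: 'for i, row in enumerate(rows): … leaf_rows.append(row)'
def aGo (rows : List (List String)) : List (List String) → Nat → List (List String)
  | [], _ => []
  | row :: rest, i =>
      let rt := pyTrim row
      if aIsLeaf rt i rows 0 then row :: aGo rows rest (i + 1) else aGo rows rest (i + 1)

def filter_leaf_paths (rows : List (List String)) : List (List String) :=
  aGo rows rows 0

-- ===== PORT B =====
-- 'for t in trimmed: for k in range(len(t)): prefixes.add(t[:k])'
def bPrefixes (trimmed : List (List String)) : PySem.Set (List String) :=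
  trimmed.foldl
    (fun s t => (List.range t.length).foldl (fun s k => PySem.Set.add s (t.take k)) s)
    PySem.Set.empty

def filter_leaf_paths_alt (rows : List (List String)) : List (List String) :=
  let trimmed := rows.map pyTrim
  let prefixes := bPrefixes trimmed
  ((rows.zip trimmed).filter (fun p => !(PySem.Set.contains prefixes p.2))).map Prod.fst

-- ===== PRECONDITION & SPEC =====
def Spec_filter_leaf_paths (rows : List (List String)) (out : List (List String)) : Prop := out = filter_leaf_paths_alt rows
instance (rows : List (List String)) (out : List (List String)) : Decidable (Spec_filter_leaf_paths rows out) := by unfold Spec_filter_leaf_paths; infer_instance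

-- ===== CLAIM (what is proved, stated in full; the proofs are below) =====
def Claim_equal_filter_leaf_paths : Prop := ∀ (rows : List (List String)), Dom_filter_leaf_paths rows → Spec_filter_leaf_paths rows (filter_leaf_paths rows)

-- ===== LEMMAS AND PROOFS =====

-- membership in the prefix set built from an accumulator
theorem mem_bPrefixes_foldl (ts : List (List String)) (s : PySem.Set (List String))
    (x : List String) :
    (x ∈ ts.foldl
        (fun s t => (List.range t.length).foldl (fun s k => PySem.Set.add s (t.take k)) s) s)
      ↔ x ∈ s ∨ ∃ t ∈ ts, ∃ k < t.length, t.take k = x := by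
  induction ts generalizing s with
  | nil => simp
  | cons t ts ih =>
    have inner : ∀ (m : Nat) (s : PySem.Set (List String)),
        (x ∈ (List.range m).foldl (fun s k => PySem.Set.add s (t.take k)) s)
          ↔ x ∈ s ∨ ∃ k < m, t.take k = x := by
      intro m
      induction m with
      | zero => simp
      | succ m ihm =>
        intro s
        rw [List.range_succ, List.foldl_append]
        simp only [List.foldl_cons, List.foldl_nil, ihm, PySem.Set.mem_add]
        constructor
        · rintro ((h | ⟨k, hk, hkx⟩) | h)
          · exact Or.inl h
          · exact Or.inr ⟨k, Nat.lt_succ_of_lt hk, hkx⟩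
          · exact Or.inr ⟨m, Nat.lt_succ_self m, h.symm⟩
        · rintro (h | ⟨k, hk, hkx⟩)
          · exact Or.inl (Or.inl h)
          · rcases Nat.lt_succ_iff_lt_or_eq.mp hk with h' | rfl
            · exact Or.inl (Or.inr ⟨k, h', hkx⟩)
            · exact Or.inr hkx.symm
    simp only [List.foldl_cons, ih, inner]
    constructor
    · rintro ((h | ⟨k, hk, hkx⟩) | ⟨u, hu, h⟩)
      · exact Or.inl h
      · exact Or.inr ⟨t, by simp, k, hk, hkx⟩
      · exact Or.inr ⟨u, by simp [hu], h⟩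
    · rintro (h | ⟨u, hu, h⟩)
      · exact Or.inl (Or.inl h)
      · rcases List.mem_cons.mp hu with rfl | hu
        · exact Or.inl (Or.inr h)
        · exact Or.inr ⟨u, hu, h⟩

theorem mem_bPrefixes (ts : List (List String)) (x : List String) :
    x ∈ bPrefixes ts ↔ ∃ t ∈ ts, ∃ k < t.length, t.take k = x := by
  unfold bPrefixes
  rw [mem_bPrefixes_foldl]
  simp [PySem.Set.empty]

-- aCond ot rt holds iff rt is a proper prefix (a 'take k', k < length) of ot
theorem aCond_iff (ot rt : List String) :
    aCond ot rt = true ↔ ∃ k < ot.length, ot.take k = rt := by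
  unfold aCond
  simp only [Bool.and_eq_true, decide_eq_true_eq]
  constructor
  · rintro ⟨hlen, htake⟩
    exact ⟨rt.length, hlen, htake⟩
  · rintro ⟨k, hk, rfl⟩
    have hl : (ot.take k).length = k := List.length_take_of_le (Nat.le_of_lt hk)
    constructor
    · omega
    · rw [hl]

-- the inner loop returns false iff some element (at enumeration offset ≠ i) triggers aCond
theorem aIsLeaf_eq_false_iff (rt : List String) (i : Nat) (l : List (List String)) (j : Nat) :
    aIsLeaf rt i l j = false ↔ ∃ n, ∃ h : n < l.length, j + n ≠ i ∧ aCond (pyTrim l[n]) rt = true := by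
  induction l generalizing j with
  | nil => simp [aIsLeaf]
  | cons other rest ih =>
    simp only [aIsLeaf]
    by_cases hij : i = j
    · subst hij
      rw [if_pos rfl, ih]
      constructor
      · rintro ⟨n, hn, hne, hc⟩
        exact ⟨n + 1, by simpa using hn, by omega, by simpa using hc⟩
      · rintro ⟨n, hn, hne, hc⟩
        match n with
        | 0 => omega
        | m + 1 =>
          exact ⟨m, by simpa using hn, by omega, by simpa using hc⟩
    · simp only [if_neg hij]
      by_cases hc : aCond (pyTrim other) rt = true
      · simp only [hc, if_true]
        exact iff_of_true trivial ⟨0, by simp, by omega, by simpa using hc⟩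
      · simp only [hc, if_false, Bool.false_eq_true]
        rw [ih]
        constructor
        · rintro ⟨n, hn, hne, h⟩
          exact ⟨n + 1, by simpa using hn, by omega, by simpa using h⟩
        · rintro ⟨n, hn, hne, h⟩
          match n with
          | 0 =>
            exact absurd (by simpa using h) hc
          | m + 1 =>
            exact ⟨m, by simpa using hn, by omega, by simpa using h⟩

-- for the i-th row of rows, the index restriction j ≠ i is vacuous (a row is never a
-- proper prefix of itself), so the inner loop tests exactly prefix-set membership
theorem aIsLeaf_eq_not_mem (rows : List (List String)) (i : Nat) (row : List String)
    (hrow : rows[i]? = some row) :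
    aIsLeaf (pyTrim row) i rows 0 = !(PySem.Set.contains (bPrefixes (rows.map pyTrim)) (pyTrim row)) := by
  have key : aIsLeaf (pyTrim row) i rows 0 = false ↔
      PySem.Set.contains (bPrefixes (rows.map pyTrim)) (pyTrim row) = true := by
    constructor
    · -- inner loop found a proper extension
      intro h
      rw [aIsLeaf_eq_false_iff] at h
      obtain ⟨n, hn, _, hc⟩ := h
      rw [aCond_iff] at hc
      obtain ⟨k, hk, hkx⟩ := hc
      exact (PySem.Set.contains_iff _ _).mpr
        ((mem_bPrefixes _ _).mpr
          ⟨pyTrim rows[n], List.mem_map_of_mem (List.getElem_mem hn), k, hk, hkx⟩)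
    · -- trimmed row is a proper prefix of some trimmed row, necessarily at another index
      intro hc
      have hmem := (mem_bPrefixes _ _).mp ((PySem.Set.contains_iff _ _).mp hc)
      obtain ⟨t, ht, k, hk, hkx⟩ := hmem
      obtain ⟨other, hother, rfl⟩ := List.mem_map.mp ht
      obtain ⟨n, hn, hrn⟩ := List.getElem_of_mem hother
      have hcond : aCond (pyTrim other) (pyTrim row) = true := by
        rw [aCond_iff]; exact ⟨k, hk, hkx⟩
      have hne : n ≠ i := by
        rintro rfl
        rw [List.getElem?_eq_getElem hn, hrn] at hrow
        obtain rfl : other = row := Option.some.inj hrow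
        have hl : (List.take k (pyTrim other)).length = k :=
          List.length_take_of_le (Nat.le_of_lt hk)
        rw [hkx] at hl
        omega
      rw [aIsLeaf_eq_false_iff]
      exact ⟨n, hn, by simpa using hne, by simpa [hrn] using hcond⟩
  rcases hb : PySem.Set.contains (bPrefixes (rows.map pyTrim)) (pyTrim row) with _ | _
  · cases ha : aIsLeaf (pyTrim row) i rows 0 with
    | false => rw [key.mp ha] at hb; cases hb
    | true => rfl
  · exact key.mpr hb

-- A's outer loop, over a suffix l of rows starting at index i, is a pointwise filter
theorem aGo_eq_filter (rows : List (List String)) (l : List (List String)) (i : Nat)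
    (hsuf : ∀ n, (h : n < l.length) → rows[i + n]? = some l[n]) :
    aGo rows l i =
      l.filter (fun row => !(PySem.Set.contains (bPrefixes (rows.map pyTrim)) (pyTrim row))) := by
  induction l generalizing i with
  | nil => simp [aGo]
  | cons row rest ih =>
    have h0 : rows[i]? = some row := by simpa using hsuf 0 (by simp)
    have hrec : aGo rows rest (i + 1) =
        rest.filter (fun row => !(PySem.Set.contains (bPrefixes (rows.map pyTrim)) (pyTrim row))) := by
      apply ih
      intro n hn
      have := hsuf (n + 1) (by simp [Nat.succ_lt_succ hn])
      simpa [Nat.add_assoc, Nat.add_comm 1 n] using this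
    simp only [aGo, aIsLeaf_eq_not_mem rows i row h0, hrec, List.filter_cons]

-- B's zip-with-trimmed filter collapses to a pointwise filter on rows
theorem zip_map_filter_fst (l : List (List String)) (q : List String → Bool) :
    ((l.zip (l.map pyTrim)).filter (fun p => q p.2)).map Prod.fst
      = l.filter (fun row => q (pyTrim row)) := by
  induction l with
  | nil => rfl
  | cons row rest ih =>
    simp only [List.map_cons, List.zip_cons_cons, List.filter_cons]
    by_cases hq : q (pyTrim row) = true
    · simp [hq, ih]
    · simp [hq, ih]

-- ===== VERDICT (by name: the statement is the Claim_ definition above) =====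
theorem filter_leaf_paths_spec : Claim_equal_filter_leaf_paths := by
  intro rows _
  show filter_leaf_paths rows = filter_leaf_paths_alt rows
  show aGo rows rows 0 =
    ((rows.zip (rows.map pyTrim)).filter
        (fun p => !(PySem.Set.contains (bPrefixes (rows.map pyTrim)) p.2))).map Prod.fst
  rw [zip_map_filter_fst rows (fun y => !(PySem.Set.contains (bPrefixes (rows.map pyTrim)) y))]
  exact aGo_eq_filter rows rows 0 (fun n h => by simp [List.getElem?_eq_getElem h])
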